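-- pv_equiv track=rewrite | github.com/lgalvao/sgc | backend/scripts/analyze_complexity.py | categorize_class
-- ===== SOURCE A (Python) =====
-- def categorize_class(class_name: str) -> str:
--     """Categoriza a classe baseado no sufixo."""
--     if 'Controller' in class_name:
--         return 'Controller'
--     elif 'Service' in class_name or 'Facade' in class_name:
--         return 'Service/Facade'
--     elif 'Repo' in class_name or 'Repository' in class_name:
--         return 'Repository'
--     elif 'Mapper' in class_name:
--         return 'Mapper'
--     elif 'Listener' in class_name:
--         return 'Listener'
--     elif 'Request' in class_name or 'Response' in class_name or 'Dto' in class_name: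
--         return 'DTO'
--     elif class_name[0].isupper() and not any(x in class_name for x in ['Service', 'Controller', 'Repo']):
--         return 'Model/Entity'
--     else:
--         return 'Other'
-- ===== SOURCE B (Python) =====
-- KEYWORDS = [
--     ('Controller', 0, 'Controller'),
--     ('Service', 1, 'Service/Facade'),
--     ('Facade', 1, 'Service/Facade'),
--     ('Repo', 2, 'Repository'),
--     ('Repository', 2, 'Repository'),
--     ('Mapper', 3, 'Mapper'),
--     ('Listener', 4, 'Listener'),
--     ('Request', 5, 'DTO'),
--     ('Response', 5, 'DTO'),
--     ('Dto', 5, 'DTO'),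
-- ]
--
--
-- def categorize_class(class_name: str) -> str:
--     # Single left-to-right scan over the string: at each position record the
--     # best-priority keyword starting there; at the end the minimum wins.
--     best = None
--     for i in range(len(class_name)):
--         for kw, prio, label in KEYWORDS:
--             if class_name.startswith(kw, i) and (best is None or prio < best[0]):
--                 best = (prio, label)
--     if best is not None:
--         return best[1]
--     return 'Model/Entity' if class_name[0].isupper() else 'Other'
-- ===== Notes on version B (the rewrite author's own statement) =====
-- stated objective: alternative
-- what changed: Instead of A's keyword-major if/elif chain of independent substring scans, B makes one position-major pass over the string, checking at each index which table keyword starts there and keeping a running minimum-priority (prio,label) accumulator; the first-matching-branch semantics becomes a minimum over occurring keywords.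
import Mathlib
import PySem

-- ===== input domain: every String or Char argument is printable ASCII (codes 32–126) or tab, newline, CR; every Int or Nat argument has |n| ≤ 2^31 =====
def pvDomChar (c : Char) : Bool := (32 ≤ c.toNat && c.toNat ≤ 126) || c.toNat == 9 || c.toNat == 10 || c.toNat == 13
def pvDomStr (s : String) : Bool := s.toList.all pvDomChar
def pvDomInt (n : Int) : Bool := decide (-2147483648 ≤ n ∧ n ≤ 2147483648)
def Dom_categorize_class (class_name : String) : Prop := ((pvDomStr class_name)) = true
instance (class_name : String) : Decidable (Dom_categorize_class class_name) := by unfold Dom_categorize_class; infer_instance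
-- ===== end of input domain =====

-- B replaces A's keyword-major if/elif chain by a single position-major scan keeping a
-- running minimum-priority (prio, label) accumulator; alternative decomposition, same cost.

-- ===== PORT A =====
def categorize_class (class_name : String) : String :=
  if PySem.Str.isIn "Controller" class_name then "Controller"
  else if PySem.Str.isIn "Service" class_name || PySem.Str.isIn "Facade" class_name then "Service/Facade"
  else if PySem.Str.isIn "Repo" class_name || PySem.Str.isIn "Repository" class_name then "Repository"
  else if PySem.Str.isIn "Mapper" class_name then "Mapper"
  else if PySem.Str.isIn "Listener" class_name then "Listener"
  else if PySem.Str.isIn "Request" class_name || PySem.Str.isIn "Response" class_name || PySem.Str.isIn "Dto" class_name then "DTO"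
  else
    match PySem.Str.pyGet? class_name 0 with
    | some c =>
        if PySem.Chars.isupper c &&
           !(["Service", "Controller", "Repo"].any (fun x => PySem.Str.isIn x class_name)) then
          "Model/Entity"
        else "Other"
    | none => "Other"   -- Python raises IndexError here; excluded by Pre_

-- ===== PORT B =====
def pvKeywords : List (List Char × Nat × String) :=
  [("Controller".toList, 0, "Controller"),
   ("Service".toList, 1, "Service/Facade"),
   ("Facade".toList, 1, "Service/Facade"),
   ("Repo".toList, 2, "Repository"),
   ("Repository".toList, 2, "Repository"),
   ("Mapper".toList, 3, "Mapper"),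
   ("Listener".toList, 4, "Listener"),
   ("Request".toList, 5, "DTO"),
   ("Response".toList, 5, "DTO"),
   ("Dto".toList, 5, "DTO")]

def categorize_class_alt (class_name : String) : String :=
  let s := class_name.toList
  -- class_name.startswith(kw, i) with 0 ≤ i is exactly startswith on s.drop i
  let best := (List.range s.length).foldl
    (fun b i => pvKeywords.foldl
      (fun b kwp =>
        if PySem.Chars.startswith (s.drop i) kwp.1 &&
           (b.elim true (fun q => kwp.2.1 < q.1)) then some (kwp.2.1, kwp.2.2) else b) b)
    none
  match best with
  | some q => q.2
  | none =>
    match PySem.Str.pyGet? class_name 0 with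
    | some c => if PySem.Chars.isupper c then "Model/Entity" else "Other"
    | none => "Other"   -- Python raises IndexError here; excluded by Pre_

-- ===== PRECONDITION & SPEC =====
-- Both Pythons raise IndexError on the empty string (class_name[0]); Pre_ excludes exactly that input.
def Pre_categorize_class (class_name : String) : Prop := class_name ≠ ""
instance (class_name : String) : Decidable (Pre_categorize_class class_name) := by unfold Pre_categorize_class; infer_instance
def pvWitness_categorize_class : String := "UserController"

def Spec_categorize_class (class_name : String) (out : String) : Prop := out = categorize_class_alt class_name
instance (class_name : String) (out : String) : Decidable (Spec_categorize_class class_name out) := by unfold Spec_categorize_class; infer_instance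

-- ===== CLAIM (what is proved, stated in full; the proofs are below) =====
def Claim_equal_categorize_class : Prop := ∀ (class_name : String), Dom_categorize_class class_name → Pre_categorize_class class_name → Spec_categorize_class class_name (categorize_class class_name)

-- ===== LEMMAS AND PROOFS =====

/-- The running-minimum step, folded over a list of optional contributions. -/
def pvRun (l : List (Option (Nat × String))) (b : Option (Nat × String)) : Option (Nat × String) :=
  l.foldl (fun b o => match o with
    | none => b
    | some p => match b with
      | none => some p
      | some q => if p.1 < q.1 then some p else b) b

/-- All per-(position, keyword) contributions of B's double loop, flattened. -/
def pvOs (s : List Char) : List (Option (Nat × String)) :=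
  (List.range s.length).flatMap (fun i => pvKeywords.map
    (fun kwp => if PySem.Chars.startswith (s.drop i) kwp.1 then some (kwp.2.1, kwp.2.2) else none))

theorem pvRun_cons (o : Option (Nat × String)) (l : List (Option (Nat × String))) (b : Option (Nat × String)) :
    pvRun (o :: l) b = pvRun l (match o with
      | none => b
      | some p => match b with
        | none => some p
        | some q => if p.1 < q.1 then some p else b) := rfl

theorem pvRun_append (xs ys : List (Option (Nat × String))) (b : Option (Nat × String)) :
    pvRun (xs ++ ys) b = pvRun ys (pvRun xs b) := by
  simp [pvRun, List.foldl_append]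

/-- B's inner keyword fold equals pvRun over the mapped contributions. -/
theorem pvInner_eq (t : List Char) :
    ∀ (l : List (List Char × Nat × String)) (b : Option (Nat × String)),
    l.foldl (fun b kwp =>
        if PySem.Chars.startswith t kwp.1 && (b.elim true (fun q => kwp.2.1 < q.1))
        then some (kwp.2.1, kwp.2.2) else b) b
    = pvRun (l.map (fun kwp => if PySem.Chars.startswith t kwp.1 then some (kwp.2.1, kwp.2.2) else none)) b := by
  intro l
  induction l with
  | nil => intro b; rfl
  | cons a l ih =>
      intro b
      simp only [List.foldl_cons, List.map_cons, pvRun_cons]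
      rw [ih]
      congr 1
      cases hm : PySem.Chars.startswith t a.1 <;> cases b <;>
        simp [Option.elim]

/-- B's outer fold over positions equals pvRun over the flattened contribution list. -/
theorem pvOuter_eq (s : List Char) :
    ∀ (ix : List Nat) (b : Option (Nat × String)),
    ix.foldl (fun b i => pvKeywords.foldl
      (fun b kwp =>
        if PySem.Chars.startswith (s.drop i) kwp.1 && (b.elim true (fun q => kwp.2.1 < q.1))
        then some (kwp.2.1, kwp.2.2) else b) b) b
    = pvRun (ix.flatMap (fun i => pvKeywords.map
        (fun kwp => if PySem.Chars.startswith (s.drop i) kwp.1 then some (kwp.2.1, kwp.2.2) else none))) b := by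
  intro ix
  induction ix with
  | nil => intro b; rfl
  | cons i ix ih =>
      intro b
      simp only [List.foldl_cons, List.flatMap_cons, pvRun_append]
      rw [pvInner_eq, ih]

theorem pvAlt_eq (class_name : String) :
    categorize_class_alt class_name =
      match pvRun (pvOs class_name.toList) none with
      | some q => q.2
      | none =>
        match PySem.Str.pyGet? class_name 0 with
        | some c => if PySem.Chars.isupper c then "Model/Entity" else "Other"
        | none => "Other" := by
  unfold categorize_class_alt pvOs
  simp only [pvOuter_eq]

/-- pvRun's result is one of the contributions (or the seed). -/
theorem pvRun_src : ∀ (l : List (Option (Nat × String))) (b q : Option (Nat × String)),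
    pvRun l b = q → q = b ∨ q ∈ l := by
  intro l
  induction l with
  | nil => intro b q h; exact Or.inl h.symm
  | cons o l ih =>
      intro b q h
      rw [pvRun_cons] at h
      rcases ih _ _ h with h' | h'
      · cases o with
        | none => exact Or.inl h'
        | some p =>
            cases b with
            | none => exact Or.inr (by simp [h'])
            | some r =>
                by_cases hlt : p.1 < r.1
                · simp [hlt] at h'; exact Or.inr (by simp [h'])
                · simp [hlt] at h'; exact Or.inl (by simp [h'])
      · exact Or.inr (List.mem_cons_of_mem _ h')

/-- pvRun from a some-seed stays some, never increasing the priority. -/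
theorem pvRun_seed : ∀ (l : List (Option (Nat × String))) (r : Nat × String),
    ∃ q, pvRun l (some r) = some q ∧ q.1 ≤ r.1 := by
  intro l
  induction l with
  | nil => intro r; exact ⟨r, rfl, le_refl _⟩
  | cons o l ih =>
      intro r
      rw [pvRun_cons]
      cases o with
      | none => exact ih r
      | some p =>
          by_cases hlt : p.1 < r.1
          · simp only [hlt, if_true]
            obtain ⟨q, hq, hle⟩ := ih p
            exact ⟨q, hq, hle.trans (le_of_lt hlt)⟩
          · simp only [hlt, if_false]
            exact ih r

/-- A contribution present in the list forces a some-result at most that priority. -/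
theorem pvRun_occ : ∀ (l : List (Option (Nat × String))) (b : Option (Nat × String)) (p : Nat × String),
    some p ∈ l → ∃ q, pvRun l b = some q ∧ q.1 ≤ p.1 := by
  intro l
  induction l with
  | nil => intro b p h; simp at h
  | cons o l ih =>
      intro b p h
      rw [pvRun_cons]
      rcases List.mem_cons.mp h with h | h
      · subst h
        cases b with
        | none => exact pvRun_seed l p
        | some r =>
            by_cases hlt : p.1 < r.1
            · simp only [hlt, if_true]; exact pvRun_seed l p
            · simp only [hlt, if_false]
              obtain ⟨q, hq, hle⟩ := pvRun_seed l r
              exact ⟨q, hq, hle.trans (le_of_not_gt hlt)⟩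
      · exact ih _ p h

/-- startswith somewhere inside the string ↔ Python's 'kw in s', for nonempty kw. -/
theorem pvOcc_iff (s kw : List Char) (hne : kw ≠ []) :
    (∃ i, i < s.length ∧ PySem.Chars.startswith (s.drop i) kw = true) ↔ PySem.Chars.isIn kw s = true := by
  rw [← PySem.Chars.exists_prefix_drop_iff_isIn]
  constructor
  · rintro ⟨i, _, h⟩
    exact ⟨i, (PySem.Chars.startswith_iff _ _).mp h⟩
  · rintro ⟨j, h⟩
    by_cases hj : j < s.length
    · exact ⟨j, hj, (PySem.Chars.startswith_iff _ _).mpr h⟩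
    · exfalso
      rw [List.drop_eq_nil_of_le (le_of_not_gt hj)] at h
      exact hne (List.prefix_nil.mp h)

/-- An occurring table keyword forces B's best to be some q with q.1 ≤ its priority. -/
theorem pvBest_occ (s kw : List Char) (p : Nat) (lab : String)
    (hmem : (kw, p, lab) ∈ pvKeywords) (hne : kw ≠ [])
    (hocc : PySem.Chars.isIn kw s = true) :
    ∃ q, pvRun (pvOs s) none = some q ∧ q.1 ≤ p := by
  obtain ⟨i, hi, hsw⟩ := (pvOcc_iff s kw hne).mpr hocc
  have hmem' : some (p, lab) ∈ pvOs s := by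
    unfold pvOs
    rw [List.mem_flatMap]
    exact ⟨i, List.mem_range.mpr hi, List.mem_map.mpr ⟨(kw, p, lab), hmem, by simp [hsw]⟩⟩
  exact pvRun_occ _ none _ hmem'

/-- B's best, when some, names a table entry whose keyword occurs in s. -/
theorem pvBest_src (s : List Char) (q : Nat × String)
    (h : pvRun (pvOs s) none = some q) :
    ∃ kwp ∈ pvKeywords, q = (kwp.2.1, kwp.2.2) ∧ PySem.Chars.isIn kwp.1 s = true := by
  rcases pvRun_src _ none _ h with h' | h'
  · exact absurd h' (by simp)
  · unfold pvOs at h'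
    rw [List.mem_flatMap] at h'
    obtain ⟨i, hi, h'⟩ := h'
    rw [List.mem_map] at h'
    obtain ⟨kwp, hkwp, heq⟩ := h'
    by_cases hsw : PySem.Chars.startswith (s.drop i) kwp.1 = true
    · -- every table keyword is nonempty
      have hne : kwp.1 ≠ [] := by
        revert hkwp; unfold pvKeywords; intro hkwp
        fin_cases hkwp <;> decide
      refine ⟨kwp, hkwp, ?_, (pvOcc_iff s kwp.1 hne).mp ⟨i, List.mem_range.mp hi, hsw⟩⟩
      simp [hsw] at heq; exact heq.symm
    · simp [hsw] at heq

/-- If some keyword of priority p occurs, none of lower priority occurs, and every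
priority-p entry carries label lab, then B's best's label is lab. -/
theorem pvBest_label (s kw : List Char) (p : Nat) (lab : String)
    (hmem : (kw, p, lab) ∈ pvKeywords) (hne : kw ≠ [])
    (hocc : PySem.Chars.isIn kw s = true)
    (hlow : ∀ kwp ∈ pvKeywords, kwp.2.1 < p → PySem.Chars.isIn kwp.1 s = false)
    (hsame : ∀ kwp ∈ pvKeywords, kwp.2.1 = p → kwp.2.2 = lab) :
    ∃ q, pvRun (pvOs s) none = some q ∧ q.2 = lab := by
  obtain ⟨q, hq, hle⟩ := pvBest_occ s kw p lab hmem hne hocc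
  obtain ⟨kwp, hkwp, hqe, hocc'⟩ := pvBest_src s q hq
  have hnlt : ¬ kwp.2.1 < p := by
    intro hlt
    rw [hlow kwp hkwp hlt] at hocc'
    exact Bool.false_ne_true hocc'
  have hle' : kwp.2.1 ≤ p := by rw [hqe] at hle; exact hle
  have hp : kwp.2.1 = p := le_antisymm hle' (le_of_not_gt hnlt)
  exact ⟨q, hq, by rw [hqe]; exact hsame kwp hkwp hp⟩

-- ===== VERDICT (by name: the statement is the Claim_ definition above) =====
theorem categorize_class_spec : Claim_equal_categorize_class := by
  intro cn _ _
  unfold Spec_categorize_class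
  rw [pvAlt_eq]
  unfold categorize_class
  simp only [PySem.Str.isIn_eq]
  cases h1 : PySem.Chars.isIn "Controller".toList cn.toList with
  | true =>
      obtain ⟨q, hq, hlab⟩ := pvBest_label cn.toList "Controller".toList 0 "Controller"
        (by unfold pvKeywords; simp) (by decide) h1
        (by intro kwp hk hlt; unfold pvKeywords at hk; fin_cases hk <;> simp_all)
        (by intro kwp hk hp; unfold pvKeywords at hk; fin_cases hk <;> simp_all)
      rw [hq]; simp [h1, hlab]
  | false =>
  cases h2 : PySem.Chars.isIn "Service".toList cn.toList with
  | true =>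
      obtain ⟨q, hq, hlab⟩ := pvBest_label cn.toList "Service".toList 1 "Service/Facade"
        (by unfold pvKeywords; simp) (by decide) h2
        (by intro kwp hk hlt; unfold pvKeywords at hk; fin_cases hk <;> simp_all)
        (by intro kwp hk hp; unfold pvKeywords at hk; fin_cases hk <;> simp_all)
      rw [hq]; simp [h1, h2, hlab]
  | false =>
  cases h3 : PySem.Chars.isIn "Facade".toList cn.toList with
  | true =>
      obtain ⟨q, hq, hlab⟩ := pvBest_label cn.toList "Facade".toList 1 "Service/Facade"
        (by unfold pvKeywords; simp) (by decide) h3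
        (by intro kwp hk hlt; unfold pvKeywords at hk; fin_cases hk <;> simp_all)
        (by intro kwp hk hp; unfold pvKeywords at hk; fin_cases hk <;> simp_all)
      rw [hq]; simp [h1, h2, h3, hlab]
  | false =>
  cases h4 : PySem.Chars.isIn "Repo".toList cn.toList with
  | true =>
      obtain ⟨q, hq, hlab⟩ := pvBest_label cn.toList "Repo".toList 2 "Repository"
        (by unfold pvKeywords; simp) (by decide) h4
        (by intro kwp hk hlt; unfold pvKeywords at hk; fin_cases hk <;> simp_all)
        (by intro kwp hk hp; unfold pvKeywords at hk; fin_cases hk <;> simp_all)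
      rw [hq]; simp [h1, h2, h3, h4, hlab]
  | false =>
  cases h5 : PySem.Chars.isIn "Repository".toList cn.toList with
  | true =>
      obtain ⟨q, hq, hlab⟩ := pvBest_label cn.toList "Repository".toList 2 "Repository"
        (by unfold pvKeywords; simp) (by decide) h5
        (by intro kwp hk hlt; unfold pvKeywords at hk; fin_cases hk <;> simp_all)
        (by intro kwp hk hp; unfold pvKeywords at hk; fin_cases hk <;> simp_all)
      rw [hq]; simp [h1, h2, h3, h4, h5, hlab]
  | false =>
  cases h6 : PySem.Chars.isIn "Mapper".toList cn.toList with
  | true =>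
      obtain ⟨q, hq, hlab⟩ := pvBest_label cn.toList "Mapper".toList 3 "Mapper"
        (by unfold pvKeywords; simp) (by decide) h6
        (by intro kwp hk hlt; unfold pvKeywords at hk; fin_cases hk <;> simp_all)
        (by intro kwp hk hp; unfold pvKeywords at hk; fin_cases hk <;> simp_all)
      rw [hq]; simp [h1, h2, h3, h4, h5, h6, hlab]
  | false =>
  cases h7 : PySem.Chars.isIn "Listener".toList cn.toList with
  | true =>
      obtain ⟨q, hq, hlab⟩ := pvBest_label cn.toList "Listener".toList 4 "Listener"
        (by unfold pvKeywords; simp) (by decide) h7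
        (by intro kwp hk hlt; unfold pvKeywords at hk; fin_cases hk <;> simp_all)
        (by intro kwp hk hp; unfold pvKeywords at hk; fin_cases hk <;> simp_all)
      rw [hq]; simp [h1, h2, h3, h4, h5, h6, h7, hlab]
  | false =>
  cases h8 : PySem.Chars.isIn "Request".toList cn.toList with
  | true =>
      obtain ⟨q, hq, hlab⟩ := pvBest_label cn.toList "Request".toList 5 "DTO"
        (by unfold pvKeywords; simp) (by decide) h8
        (by intro kwp hk hlt; unfold pvKeywords at hk; fin_cases hk <;> simp_all)
        (by intro kwp hk hp; unfold pvKeywords at hk; fin_cases hk <;> simp_all)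
      rw [hq]; simp [h1, h2, h3, h4, h5, h6, h7, h8, hlab]
  | false =>
  cases h9 : PySem.Chars.isIn "Response".toList cn.toList with
  | true =>
      obtain ⟨q, hq, hlab⟩ := pvBest_label cn.toList "Response".toList 5 "DTO"
        (by unfold pvKeywords; simp) (by decide) h9
        (by intro kwp hk hlt; unfold pvKeywords at hk; fin_cases hk <;> simp_all)
        (by intro kwp hk hp; unfold pvKeywords at hk; fin_cases hk <;> simp_all)
      rw [hq]; simp [h1, h2, h3, h4, h5, h6, h7, h8, h9, hlab]
  | false =>
  cases h10 : PySem.Chars.isIn "Dto".toList cn.toList with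
  | true =>
      obtain ⟨q, hq, hlab⟩ := pvBest_label cn.toList "Dto".toList 5 "DTO"
        (by unfold pvKeywords; simp) (by decide) h10
        (by intro kwp hk hlt; unfold pvKeywords at hk; fin_cases hk <;> simp_all)
        (by intro kwp hk hp; unfold pvKeywords at hk; fin_cases hk <;> simp_all)
      rw [hq]; simp [h1, h2, h3, h4, h5, h6, h7, h8, h9, h10, hlab]
  | false =>
      cases hr : pvRun (pvOs cn.toList) none with
      | some q =>
          obtain ⟨kwp, hkwp, hqe, hocc⟩ := pvBest_src cn.toList q hr
          unfold pvKeywords at hkwp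
          fin_cases hkwp <;> simp_all
      | none => simp_all
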